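-- pv_equiv track=rewrite | github.com/shitritg/KLW_Server | hugobotPropertiesBounds.py | get_hogubot_output_bins_number
-- ===== SOURCE A (Python) =====
-- def get_hogubot_output_bins_number(bins):
--
--     counter = 0
--     number_of_bins = []
--
--     for bin_id in bins:
--         if bin_id == 0:
--             number_of_bins.append(counter)
--             counter = 1
--         else:
--             counter += 1
--     number_of_bins.append(counter)
--     return number_of_bins[1:]
-- ===== SOURCE B (Python) =====
-- def get_hogubot_output_bins_number(bins):
--     bins = list(bins)
--     positions = [i for i, b in enumerate(bins) if b == 0]
--     positions.append(len(bins))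
--     return [positions[i + 1] - positions[i] for i in range(len(positions) - 1)]
-- ===== Notes on version B (the rewrite author's own statement) =====
-- stated objective: alternative
-- what changed: Replaces A's running counter/accumulator loop by collecting the indices of zeros, appending len(bins) as a sentinel, and returning the consecutive differences of that index list.
import Mathlib
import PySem

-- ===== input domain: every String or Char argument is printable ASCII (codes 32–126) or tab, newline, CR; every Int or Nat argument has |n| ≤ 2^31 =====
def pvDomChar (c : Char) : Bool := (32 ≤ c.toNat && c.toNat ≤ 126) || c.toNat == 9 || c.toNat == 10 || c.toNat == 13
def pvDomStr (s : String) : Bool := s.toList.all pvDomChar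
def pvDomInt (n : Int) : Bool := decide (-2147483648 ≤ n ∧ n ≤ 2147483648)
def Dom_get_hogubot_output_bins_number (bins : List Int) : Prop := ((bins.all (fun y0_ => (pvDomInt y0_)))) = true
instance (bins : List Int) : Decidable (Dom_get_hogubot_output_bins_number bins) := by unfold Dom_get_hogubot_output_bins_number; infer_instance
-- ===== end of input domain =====

-- B replaces A's running counter/accumulator loop by differencing the list of zero positions
-- (with len(bins) appended as sentinel); alternative decomposition, same O(n) cost.

-- ===== PORT A =====
-- the for-loop over bins with state (counter, number_of_bins)
def pvAloop : List Int → Int → List Int → List Int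
  | [], counter, number_of_bins => number_of_bins ++ [counter]
  | bin_id :: rest, counter, number_of_bins =>
      if bin_id == 0 then pvAloop rest 1 (number_of_bins ++ [counter])
      else pvAloop rest (counter + 1) number_of_bins

def get_hogubot_output_bins_number (bins : List Int) : List Int :=
  PySem.List.slice (pvAloop bins 0 []) (some 1) none   -- number_of_bins[1:]

-- ===== PORT B =====
def get_hogubot_output_bins_number_alt (bins : List Int) : List Int :=
  -- positions = [i for i, b in enumerate(bins) if b == 0]
  let positions := ((PySem.List.enumerate bins).filter (fun p => p.2 == 0)).map (fun p => p.1)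
  -- positions.append(len(bins))
  let ps := positions ++ [(bins.length : Int)]
  -- [ps[i+1] - ps[i] for i in range(len(ps)-1)]: indices are in range, so ps[i] is ported as getD
  (List.range (ps.length - 1)).map (fun i => ps.getD (i + 1) 0 - ps.getD i 0)

-- ===== PRECONDITION & SPEC =====
def Spec_get_hogubot_output_bins_number (bins : List Int) (out : List Int) : Prop := out = get_hogubot_output_bins_number_alt bins
instance (bins : List Int) (out : List Int) : Decidable (Spec_get_hogubot_output_bins_number bins out) := by unfold Spec_get_hogubot_output_bins_number; infer_instance

-- ===== CLAIM (what is proved, stated in full; the proofs are below) =====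
def Claim_equal_get_hogubot_output_bins_number : Prop := ∀ (bins : List Int), Dom_get_hogubot_output_bins_number bins → Spec_get_hogubot_output_bins_number bins (get_hogubot_output_bins_number bins)

-- ===== LEMMAS AND PROOFS =====

-- consecutive differences, recursively
def pvDiffs : List Int → List Int
  | a :: b :: t => (b - a) :: pvDiffs (b :: t)
  | _ => []

-- zero positions starting the index count at s
def pvPos (s : Int) (bins : List Int) : List Int :=
  ((PySem.List.enumerate bins s).filter (fun p => p.2 == 0)).map (fun p => p.1)

-- index (relative) of the first zero, or the length if none
def pvHd : List Int → Int
  | [] => 0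
  | b :: bs => if b == 0 then 0 else 1 + pvHd bs

theorem pvPos_nil (s : Int) : pvPos s [] = [] := by simp [pvPos, PySem.List.enumerate_nil]

theorem pvPos_cons (s : Int) (b : Int) (bs : List Int) :
    pvPos s (b :: bs) = (if b == 0 then [s] else []) ++ pvPos (s + 1) bs := by
  by_cases h : b = 0 <;> simp [pvPos, PySem.List.enumerate_cons, h]

theorem pvAloop_acc (bins : List Int) : ∀ (c : Int) (acc : List Int),
    pvAloop bins c acc = acc ++ pvAloop bins c [] := by
  induction bins with
  | nil => intro c acc; simp [pvAloop]
  | cons b bs ih =>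
      intro c acc
      by_cases h : b = 0
      · have h1 := ih 1 (acc ++ [c])
        have h2 := ih 1 [c]
        simp only [pvAloop, h, beq_self_eq_true, if_true, List.nil_append]
        rw [h1, h2, List.append_assoc]
      · simp only [pvAloop, beq_iff_eq, if_neg h]
        exact ih (c + 1) acc

theorem pvPos_head (bins : List Int) : ∀ (s : Int),
    (pvPos s bins ++ [s + bins.length]).head? = some (s + pvHd bins) := by
  induction bins with
  | nil => intro s; simp [pvPos_nil, pvHd]
  | cons b bs ih =>
      intro s
      by_cases h : b = 0
      · simp [pvPos_cons, pvHd, h]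
      · have hih := ih (s + 1)
        rw [pvPos_cons]
        simp only [pvHd, beq_iff_eq, if_neg h, List.nil_append, List.length_cons]
        push_cast
        rw [show s + ((bs.length : Int) + 1) = (s + 1) + bs.length from by ring, hih]
        congr 1
        ring

theorem pvDiffs_cons_of_head {a : Int} {l : List Int} {h : Int} (hh : l.head? = some h) :
    pvDiffs (a :: l) = (h - a) :: pvDiffs l := by
  cases l with
  | nil => simp at hh
  | cons x t => simp at hh; subst hh; simp [pvDiffs]

theorem pvAloop_eq (bins : List Int) : ∀ (c : Int) (s : Int),
    pvAloop bins c [] = (c + pvHd bins) :: pvDiffs (pvPos s bins ++ [s + bins.length]) := by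
  induction bins with
  | nil => intro c s; simp [pvAloop, pvPos_nil, pvHd, pvDiffs]
  | cons b bs ih =>
      intro c s
      by_cases h : b = 0
      · subst h
        have hhead := pvPos_head bs (s + 1)
        have hd := pvDiffs_cons_of_head (a := s) hhead
        simp only [pvAloop, beq_self_eq_true, if_true, List.nil_append]
        rw [pvAloop_acc, ih 1 (s + 1), pvPos_cons]
        simp only [beq_self_eq_true, if_true, List.length_cons, List.cons_append,
          List.nil_append, pvHd]
        push_cast
        rw [show s + ((bs.length : Int) + 1) = (s + 1) + bs.length from by ring, hd]
        rw [show s + 1 + pvHd bs - s = 1 + pvHd bs from by ring]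
        simp
      · simp only [pvAloop, beq_iff_eq, if_neg h]
        rw [ih (c + 1) (s + 1), pvPos_cons]
        simp only [beq_iff_eq, if_neg h, List.nil_append, List.length_cons, pvHd]
        push_cast
        rw [show s + ((bs.length : Int) + 1) = (s + 1) + bs.length from by ring]
        rw [show c + 1 + pvHd bs = c + (1 + pvHd bs) from by ring]

theorem pvRange_diffs (ps : List Int) :
    (List.range (ps.length - 1)).map (fun i => ps.getD (i + 1) 0 - ps.getD i 0) = pvDiffs ps := by
  induction ps with
  | nil => simp [pvDiffs]
  | cons a t ih =>
      cases t with
      | nil => simp [pvDiffs]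
      | cons b u =>
          simp only [List.length_cons, Nat.add_sub_cancel] at *
          rw [List.range_succ_eq_map]
          simp only [List.map_cons, List.map_map]
          rw [pvDiffs, ← ih]
          simp [Function.comp]

-- ===== VERDICT (by name: the statement is the Claim_ definition above) =====
theorem get_hogubot_output_bins_number_spec : Claim_equal_get_hogubot_output_bins_number := by
  intro bins _
  unfold Spec_get_hogubot_output_bins_number get_hogubot_output_bins_number
    get_hogubot_output_bins_number_alt
  rw [PySem.List.slice_from_one, pvAloop_eq bins 0 0, pvRange_diffs]
  show pvDiffs (pvPos 0 bins ++ [(0 : Int) + bins.length])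
      = pvDiffs (pvPos 0 bins ++ [(bins.length : Int)])
  norm_num
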